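-- pv_equiv track=rewrite | github.com/jmcbee-dev/collatzlab | tests.py | find_reduced_c
-- ===== SOURCE A (Python) =====
-- def find_reduced_c(binary_string, rule_0=2, rule_1=3):
--     count_1 = binary_string.count('1')
--     count_0_left = 0
--     count_1_left = 0
--     c = 0
--
--     for pos in range(len(binary_string)):
--         if binary_string[pos] == '1':
--             c_p = 1
--             count_1 -= 1
--             c_p *= (rule_1 ** count_1) * (rule_0 ** (count_0_left + count_1_left))
--             c += c_p
--             count_1_left += 1
--         if binary_string[pos] == '0':
--             count_0_left += 1
--     return c
-- ===== SOURCE B (Python) =====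
-- def find_reduced_c(binary_string, rule_0=2, rule_1=3):
--     # Horner-style single pass: no pow() calls, one multiplication per step.
--     c = 0
--     p0 = 1  # rule_0 ** (number of '0'/'1' characters seen so far)
--     for ch in binary_string:
--         if ch == '1':
--             c = c * rule_1 + p0
--             p0 *= rule_0
--         elif ch == '0':
--             p0 *= rule_0
--     return c
-- ===== Notes on version B (the rewrite author's own statement) =====
-- stated objective: alternative
-- what changed: Replaced the per-one-bit recomputation of rule_1**remaining_ones and rule_0**prefix with a Horner-style single pass that maintains a running power of rule_0 and folds the rule_1 factors into the accumulator, so no pow() is ever called.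
import Mathlib
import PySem

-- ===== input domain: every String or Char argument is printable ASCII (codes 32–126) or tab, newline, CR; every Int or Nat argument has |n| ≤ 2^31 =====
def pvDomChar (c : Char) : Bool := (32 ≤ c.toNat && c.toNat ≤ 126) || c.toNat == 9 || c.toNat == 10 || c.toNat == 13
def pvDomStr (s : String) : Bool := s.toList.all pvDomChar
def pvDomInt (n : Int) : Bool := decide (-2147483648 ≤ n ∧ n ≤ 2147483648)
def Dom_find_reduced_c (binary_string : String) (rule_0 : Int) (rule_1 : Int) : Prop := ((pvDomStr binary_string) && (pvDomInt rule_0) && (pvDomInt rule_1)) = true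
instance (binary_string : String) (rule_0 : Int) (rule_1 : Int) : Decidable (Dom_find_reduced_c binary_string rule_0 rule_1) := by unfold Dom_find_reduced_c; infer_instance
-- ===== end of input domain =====

-- B replaces A's per-'1' pow() recomputations by a Horner-style single pass with one running power of rule_0.
-- B replaces A's per-'1' pow() recomputations by a Horner-style single pass with one running power of rule_0.
-- ===== PORT A =====
-- A's loop body (state = (count_1, count_0_left, count_1_left, c)); exponents are nonnegative throughout, so .toNat is exact.
def pvAStep (rule_0 rule_1 : Int) (st : Int × Int × Int × Int) (ch : Char) : Int × Int × Int × Int :=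
  let k := st.1; let z := st.2.1; let o := st.2.2.1; let c := st.2.2.2
  let (k, c, o) :=
    if ch = '1' then
      -- c_p = 1; count_1 -= 1; c_p *= rule_1**count_1 * rule_0**(count_0_left+count_1_left); c += c_p; count_1_left += 1
      (k - 1, c + 1 * ((rule_1 ^ (k - 1).toNat) * (rule_0 ^ (z + o).toNat)), o + 1)
    else (k, c, o)
  let z := if ch = '0' then z + 1 else z
  (k, z, o, c)

def find_reduced_c (binary_string : String) (rule_0 : Int) (rule_1 : Int) : Int :=
  let count_1 : Int := (PySem.Str.count binary_string "1" : Int)   -- binary_string.count('1')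
  (binary_string.toList.foldl (pvAStep rule_0 rule_1) (count_1, 0, 0, 0)).2.2.2

-- ===== PORT B =====
-- B's loop body (state = (c, p0))
def pvBStep (rule_0 rule_1 : Int) (st : Int × Int) (ch : Char) : Int × Int :=
  if ch = '1' then (st.1 * rule_1 + st.2, st.2 * rule_0)
  else if ch = '0' then (st.1, st.2 * rule_0)
  else st

def find_reduced_c_alt (binary_string : String) (rule_0 : Int) (rule_1 : Int) : Int :=
  (binary_string.toList.foldl (pvBStep rule_0 rule_1) (0, 1)).1

-- ===== PRECONDITION & SPEC =====
def Spec_find_reduced_c (binary_string : String) (rule_0 : Int) (rule_1 : Int) (out : Int) : Prop := out = find_reduced_c_alt binary_string rule_0 rule_1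
instance (binary_string : String) (rule_0 : Int) (rule_1 : Int) (out : Int) : Decidable (Spec_find_reduced_c binary_string rule_0 rule_1 out) := by unfold Spec_find_reduced_c; infer_instance

-- ===== CLAIM (what is proved, stated in full; the proofs are below) =====
def Claim_equal_find_reduced_c : Prop := ∀ (binary_string : String) (rule_0 : Int) (rule_1 : Int), Dom_find_reduced_c binary_string rule_0 rule_1 → Spec_find_reduced_c binary_string rule_0 rule_1 (find_reduced_c binary_string rule_0 rule_1)

-- ===== LEMMAS AND PROOFS =====
-- one-step evaluation of the two loop bodies
theorem pvAStep_one (r0 r1 k z o c : Int) :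
    pvAStep r0 r1 (k, z, o, c) '1' = (k - 1, z, o + 1, c + 1 * ((r1 ^ (k - 1).toNat) * (r0 ^ (z + o).toNat))) := rfl
theorem pvAStep_zero (r0 r1 k z o c : Int) :
    pvAStep r0 r1 (k, z, o, c) '0' = (k, z + 1, o, c) := rfl
theorem pvAStep_other (r0 r1 k z o c : Int) (ch : Char) (h1 : ch ≠ '1') (h0 : ch ≠ '0') :
    pvAStep r0 r1 (k, z, o, c) ch = (k, z, o, c) := by
  simp [pvAStep, h1, h0]
theorem pvBStep_one (r0 r1 c p : Int) : pvBStep r0 r1 (c, p) '1' = (c * r1 + p, p * r0) := rfl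
theorem pvBStep_zero (r0 r1 c p : Int) : pvBStep r0 r1 (c, p) '0' = (c, p * r0) := rfl
theorem pvBStep_other (r0 r1 c p : Int) (ch : Char) (h1 : ch ≠ '1') (h0 : ch ≠ '0') :
    pvBStep r0 r1 (c, p) ch = (c, p) := by
  simp [pvBStep, h1, h0]

-- str.count with a single-character needle is the character count
theorem pv_go_single (c : Char) (l : List Char) : ∀ (fuel acc : Nat), l.length ≤ fuel →
    PySem.Chars.count.go [c] fuel l acc = acc + l.count c := by
  induction l with
  | nil => intro fuel acc h; cases fuel <;> simp [PySem.Chars.count.go]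
  | cons hd t ih =>
      intro fuel acc h
      cases fuel with
      | zero => simp at h
      | succ f =>
          simp only [PySem.Chars.count.go]
          by_cases hc : hd = c
          · subst hc
            simp [List.isPrefixOf, ih f (acc + 1) (by simpa using h)]
            omega
          · simp [List.isPrefixOf, hc, ih f acc (by simpa using h), Ne.symm hc]

theorem pv_count_single (c : Char) (cs : List Char) : PySem.Chars.count cs [c] = cs.count c := by
  simp [PySem.Chars.count, pv_go_single c cs cs.length 0 le_rfl]

-- B's fold is affine in its state: value = c·r1^(#1 l) + p·S(l), running power = p·r0^(#01 l)
theorem pv_B_affine (r0 r1 : Int) (l : List Char) : ∀ (c p : Int),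
    l.foldl (pvBStep r0 r1) (c, p)
    = (c * r1 ^ (l.count '1') + p * (l.foldl (pvBStep r0 r1) (0, 1)).1,
       p * (l.foldl (pvBStep r0 r1) (0, 1)).2) := by
  induction l with
  | nil => intro c p; simp
  | cons hd t ih =>
      intro c p
      by_cases h1 : hd = '1'
      · subst h1
        rw [List.foldl_cons, List.foldl_cons, pvBStep_one, pvBStep_one, ih, ih (0 * r1 + 1) (1 * r0)]
        simp [pow_succ]
        constructor <;> ring
      · by_cases h0 : hd = '0'
        · subst h0
          rw [List.foldl_cons, List.foldl_cons, pvBStep_zero, pvBStep_zero, ih, ih 0 (1 * r0)]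
          simp [h1]
          constructor <;> ring
        · rw [List.foldl_cons, List.foldl_cons, pvBStep_other r0 r1 c p hd h1 h0,
              pvBStep_other r0 r1 0 1 hd h1 h0, ih]
          simp [h1]

-- main invariant: A's loop started at (#1 l, z, o, c0) ends with c = c0 + r0^(z+o) · (B's value on l)
theorem pv_main (r0 r1 : Int) (l : List Char) : ∀ (z o c0 : Int), 0 ≤ z → 0 ≤ o →
    (l.foldl (pvAStep r0 r1) ((l.count '1' : Int), z, o, c0)).2.2.2
    = c0 + r0 ^ (z + o).toNat * (l.foldl (pvBStep r0 r1) (0, 1)).1 := by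
  induction l with
  | nil => intro z o c0 hz ho; simp
  | cons hd t ih =>
      intro z o c0 hz ho
      by_cases h1 : hd = '1'
      · subst h1
        have hk : ((List.count '1' ('1' :: t) : Int)) - 1 = (t.count '1' : Int) := by
          simp
        rw [List.foldl_cons, pvAStep_one, hk, List.foldl_cons, pvBStep_one]
        rw [ih z (o + 1) _ hz (by omega)]
        rw [pv_B_affine r0 r1 t (0 * r1 + 1) (1 * r0)]
        have hzo : (z + (o + 1)).toNat = (z + o).toNat + 1 := by omega
        simp only [Int.toNat_natCast, hzo, pow_succ]
        ring
      · by_cases h0 : hd = '0'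
        · subst h0
          have hk : (List.count '1' ('0' :: t) : Int) = (t.count '1' : Int) := by
            simp
          rw [List.foldl_cons, pvAStep_zero, hk, List.foldl_cons, pvBStep_zero]
          rw [ih (z + 1) o c0 (by omega) ho]
          rw [pv_B_affine r0 r1 t 0 (1 * r0)]
          have hzo : (z + 1 + o).toNat = (z + o).toNat + 1 := by omega
          simp only [hzo, pow_succ]
          ring
        · have hk : (List.count '1' (hd :: t) : Int) = (t.count '1' : Int) := by
            simp [h1]
          rw [List.foldl_cons, pvAStep_other r0 r1 _ z o c0 hd h1 h0, hk,
              List.foldl_cons, pvBStep_other r0 r1 0 1 hd h1 h0]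
          exact ih z o c0 hz ho

-- ===== VERDICT (by name: the statement is the Claim_ definition above) =====
theorem find_reduced_c_spec : Claim_equal_find_reduced_c := by
  intro s r0 r1 _
  unfold Spec_find_reduced_c find_reduced_c find_reduced_c_alt
  have h1 : ("1" : String).toList = ['1'] := rfl
  simp only [PySem.Str.count_eq, h1, pv_count_single]
  simpa using pv_main r0 r1 s.toList 0 0 0 le_rfl le_rfl
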